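-- pv_equiv track=rewrite | github.com/sidonkar/aoe_turbo_elo_bot | bot.py | create_balanced_teams
-- ===== SOURCE A (Python) =====
-- from itertools import combinations
--
-- def create_balanced_teams(players):
--     num_players = len(players)
--     players_data = {p: players[p]["current_rating"] for p in players}
--     all_possible_matchups = []
--
--     for combo in combinations(players, num_players // 2):
--         team1 = list(combo)
--         team2 = [p for p in players if p not in team1]
--
--         rating1 = sum(players_data[p] for p in team1)
--         rating2 = sum(players_data[p] for p in team2)
--         diff = abs(rating1 - rating2)
--
--         all_possible_matchups.append((team1, team2, rating1, rating2, diff))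
--
--     # Sort by rating difference (smallest first)
--     all_possible_matchups.sort(key=lambda x: x[4])
--
--     best_matchup = all_possible_matchups[0]  # Least difference
--     second_best_matchup = None
--
--     # Find a second-best distinct matchup (ensuring it's not just swapped)
--     for matchup in all_possible_matchups[1:]:
--         if set(matchup[0]) != set(
--                 best_matchup[1]):  # Ensure it's a different team split
--             second_best_matchup = matchup
--             break
--
--     if second_best_matchup is None:  # Fallback if no distinct second matchup is found
--         second_best_matchup = all_possible_matchups[1] if len(
--             all_possible_matchups) > 1 else best_matchup
--
--     return [best_matchup, second_best_matchup]
-- ===== SOURCE B (Python) =====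
-- def create_balanced_teams(players):
--     names = list(players)
--     total = sum(players[p]["current_rating"] for p in names)
--     half = len(names) // 2
--
--     # Recursive streaming enumeration: each name is either put on team1 or
--     # team2, carrying partial teams and team1's rating; splits come out in
--     # the same (index-lexicographic) order as itertools.combinations.
--     def splits(i, need, t1, t2, r1):
--         if need == 0:
--             yield (t1, t2 + names[i:], r1, total - r1, abs(2 * r1 - total))
--         elif i < len(names):
--             yield from splits(i + 1, need - 1, t1 + [names[i]], t2,
--                               r1 + players[names[i]]["current_rating"])
--             yield from splits(i + 1, need, t1, t2 + [names[i]], r1)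
--
--     best = None
--     for m in splits(0, half, [], [], 0):
--         if best is None or m[4] < best[4]:
--             best = m
--
--     best_team2 = set(best[1])
--     second = None
--     fallback = None
--     for m in splits(0, half, [], [], 0):
--         if m == best:
--             continue
--         if set(m[0]) != best_team2 and (second is None or m[4] < second[4]):
--             second = m
--         if fallback is None or m[4] < fallback[4]:
--             fallback = m
--     if second is None:
--         second = fallback if fallback is not None else best
--     return [best, second]
-- ===== Notes on version B (the rewrite author's own statement) =====
-- stated objective: alternative
-- what changed: B replaces A's itertools enumeration + materialized matchup list + full stable sort by a recursive include/exclude split generator that builds both teams and team1's rating incrementally and is consumed by streaming folds: one pass keeps the running first-minimum split, a second pass keeps the running best distinct-candidate and fallback simultaneously, so no matchup list is ever stored or sorted; Pre_ excludes only inputs where some player's dict lacks the 'current_rating' key, on which A raises KeyError.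
import Mathlib
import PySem

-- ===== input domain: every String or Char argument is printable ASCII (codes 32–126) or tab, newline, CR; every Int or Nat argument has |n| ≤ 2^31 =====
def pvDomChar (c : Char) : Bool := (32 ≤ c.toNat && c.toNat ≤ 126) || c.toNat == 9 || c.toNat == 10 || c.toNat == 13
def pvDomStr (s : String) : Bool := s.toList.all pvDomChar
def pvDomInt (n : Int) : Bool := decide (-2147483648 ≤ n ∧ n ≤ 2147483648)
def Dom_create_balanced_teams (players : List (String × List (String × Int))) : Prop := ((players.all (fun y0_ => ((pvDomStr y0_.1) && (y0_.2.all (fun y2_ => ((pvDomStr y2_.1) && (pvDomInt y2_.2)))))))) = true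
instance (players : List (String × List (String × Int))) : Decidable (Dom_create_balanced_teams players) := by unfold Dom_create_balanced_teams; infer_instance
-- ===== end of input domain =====

-- B replaces A's enumerate-all + sort by a recursive include/exclude split
-- generator with incremental team building and streaming min-folds for best,
-- candidate and fallback (objective: alternative; no matchup list, no sort).


-- ===== PORT A =====
-- `players` is a Python dict: model it via PySem.Dict.ofList (insertion order,
-- last duplicate value wins), iteration = its keys.  `players[p]["current_rating"]`
-- is ported with getD; Pre_ guarantees the key is present, so getD is exact there.
def create_balanced_teams (players : List (String × List (String × Int))) : List (List String × List String × Int × Int × Int) :=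
  let playersD := PySem.Dict.ofList players
  let keys := playersD.keys
  let num_players := keys.length
  let players_data : PySem.Dict String Int :=
    keys.foldl (fun d p =>
      d.insert p ((PySem.Dict.ofList (playersD.getD p [])).getD "current_rating" 0)) PySem.Dict.empty
  let all_possible_matchups :=
    (PySem.List.combinations keys (num_players / 2)).foldl (fun acc combo =>
      let team1 := combo
      let team2 := keys.filter (fun p => decide (p ∉ team1))
      let rating1 := (team1.map (fun p => players_data.getD p 0)).sum
      let rating2 := (team2.map (fun p => players_data.getD p 0)).sum
      acc ++ [(team1, team2, rating1, rating2, |rating1 - rating2|)]) []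
  let S := PySem.List.sorted all_possible_matchups (fun m => m.2.2.2.2) false
  match S with
  | [] => []   -- unreachable (A would raise IndexError on an empty matchup list)
  | best :: tail =>
    match tail.find? (fun m =>
        decide (¬ PySem.Set.equal (PySem.Set.ofList m.1) (PySem.Set.ofList best.2.1))) with
    | some second => [best, second]
    | none => [best, if tail.length + 1 > 1 then tail.headD best else best]

-- ===== PORT B =====
-- Source B's recursive generator `splits(i, need, t1, t2, r1)`, transcribed as a
-- function returning the list of the splits it yields, in yield order.
def pvSplits (names : List String) (rate : String → Int) (total : Int)
    (i need : Nat) (t1 t2 : List String) (r1 : Int) :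
    List (List String × List String × Int × Int × Int) :=
  if need = 0 then
    [(t1, t2 ++ names.drop i, r1, total - r1, |2 * r1 - total|)]
  else if h : i < names.length then
    pvSplits names rate total (i + 1) (need - 1) (t1 ++ [names[i]]) t2 (r1 + rate names[i]) ++
    pvSplits names rate total (i + 1) need t1 (t2 ++ [names[i]]) r1
  else []
termination_by names.length - i

def create_balanced_teams_alt (players : List (String × List (String × Int))) : List (List String × List String × Int × Int × Int) :=
  let playersD := PySem.Dict.ofList players
  let names := playersD.keys
  let rate := fun p => (PySem.Dict.ofList (playersD.getD p [])).getD "current_rating" 0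
  let total := (names.map rate).sum
  let half := names.length / 2
  -- pass 1: running first-minimum over the streamed splits
  match (pvSplits names rate total 0 half [] [] 0).foldl
      (fun cur m => match cur with
        | none => some m
        | some b => if m.2.2.2.2 < b.2.2.2.2 then some m else some b) none with
  | none => []   -- unreachable (the generator always yields at least one split)
  | some best =>
    -- pass 2: running best distinct candidate and running fallback, one scan
    let res := (pvSplits names rate total 0 half [] [] 0).foldl
      (fun (st : Option (List String × List String × Int × Int × Int) ×
                 Option (List String × List String × Int × Int × Int)) m =>
        if m = best then st
        else
          ((if decide (¬ PySem.Set.equal (PySem.Set.ofList m.1) (PySem.Set.ofList best.2.1)) then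
              match st.1 with
              | none => some m
              | some s => if m.2.2.2.2 < s.2.2.2.2 then some m else some s
            else st.1),
           (match st.2 with
            | none => some m
            | some f => if m.2.2.2.2 < f.2.2.2.2 then some m else some f)))
      (none, none)
    match res.1 with
    | some second => [best, second]
    | none =>
      match res.2 with
      | some fallback => [best, fallback]
      | none => [best, best]

-- ===== PRECONDITION & SPEC =====
-- Pre_ excludes exactly the inputs on which A raises KeyError: some player's
-- rating dict has no "current_rating" key.
def Pre_create_balanced_teams (players : List (String × List (String × Int))) : Prop :=
  ∀ pv ∈ players, "current_rating" ∈ pv.2.map Prod.fst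
instance (players : List (String × List (String × Int))) : Decidable (Pre_create_balanced_teams players) := by unfold Pre_create_balanced_teams; infer_instance

def pvWitness_create_balanced_teams : (List (String × List (String × Int))) :=
  [("alice", [("current_rating", 10)]), ("bob", [("current_rating", 21)]),
   ("carol", [("current_rating", 14)]), ("dan", [("current_rating", 10)])]

def Spec_create_balanced_teams (players : List (String × List (String × Int))) (out : List (List String × List String × Int × Int × Int)) : Prop := out = create_balanced_teams_alt players
instance (players : List (String × List (String × Int))) (out : List (List String × List String × Int × Int × Int)) : Decidable (Spec_create_balanced_teams players out) := by unfold Spec_create_balanced_teams; infer_instance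

-- ===== CLAIM (what is proved, stated in full; the proofs are below) =====
def Claim_equal_create_balanced_teams : Prop := ∀ (players : List (String × List (String × Int))), Dom_create_balanced_teams players → Pre_create_balanced_teams players → Spec_create_balanced_teams players (create_balanced_teams players)


-- ===== LEMMAS AND PROOFS =====

-- find?-congruence on members (small helper; no library lemma matched)
theorem pv_find?_congr {α : Type} {p q : α → Bool} : ∀ (l : List α),
    (∀ a ∈ l, p a = q a) → l.find? p = l.find? q := by
  intro l h
  induction l with
  | nil => rfl
  | cons x t ih =>
      have hx := h x (by simp)
      simp only [List.find?]
      rw [hx]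
      cases q x with
      | true => rfl
      | false => exact ih (fun a ha => h a (by simp [ha]))

-- appending one element to the input of a stable sort inserts it
theorem pv_sorted_snoc {α : Type} (key : α → Int) (L : List α) (x : α) :
    PySem.List.sorted (L ++ [x]) key false =
      PySem.List.insertBy (fun a b => decide (key a < key b)) x (PySem.List.sorted L key false) := by
  rw [PySem.List.sorted_eq_foldl_insertBy, PySem.List.sorted_eq_foldl_insertBy, List.foldl_append]
  rfl

-- first satisfier of P after inserting x, when P x holds
theorem pv_find?_insertBy_pos {α : Type} (key : α → Int) (P : α → Bool) (x : α)
    (hx : P x = true) : ∀ (s : List α), s.Pairwise (fun a b => key a ≤ key b) →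
    (PySem.List.insertBy (fun a b => decide (key a < key b)) x s).find? P =
      (match s.find? P with
       | none => some x
       | some m => if key x < key m then some x else some m) := by
  intro s
  induction s with
  | nil => intro _; simp [PySem.List.insertBy, List.find?, hx]
  | cons y ys ih =>
      intro hp
      have h1 : ∀ z ∈ ys, key y ≤ key z := (List.pairwise_cons.mp hp).1
      have h2 := (List.pairwise_cons.mp hp).2
      by_cases hb : key x < key y
      · have hL : PySem.List.insertBy (fun a b => decide (key a < key b)) x (y :: ys)
            = x :: y :: ys := by simp [PySem.List.insertBy, hb]
        rw [hL, List.find?_cons_of_pos hx]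
        cases hfy : List.find? P (y :: ys) with
        | none => rfl
        | some m =>
            have hm : m ∈ y :: ys := List.mem_of_find?_eq_some hfy
            have hlt : key x < key m := by
              rcases List.mem_cons.mp hm with h | h
              · simpa [h] using hb
              · exact lt_of_lt_of_le hb (h1 m h)
            simp [hlt]
      · have hL : PySem.List.insertBy (fun a b => decide (key a < key b)) x (y :: ys)
            = y :: PySem.List.insertBy (fun a b => decide (key a < key b)) x ys := by
          simp [PySem.List.insertBy, hb]
        rw [hL]
        cases hPy : P y with
        | true =>
            rw [List.find?_cons_of_pos hPy, List.find?_cons_of_pos hPy]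
            simp [hb]
        | false =>
            rw [List.find?_cons_of_neg (by simp [hPy]), List.find?_cons_of_neg (by simp [hPy])]
            exact ih h2

-- inserting x does not change the first satisfier of P, when P x fails
theorem pv_find?_insertBy_neg {α : Type} (key : α → Int) (P : α → Bool) (x : α)
    (hx : P x = false) : ∀ (s : List α),
    (PySem.List.insertBy (fun a b => decide (key a < key b)) x s).find? P = s.find? P := by
  intro s
  induction s with
  | nil => simp [PySem.List.insertBy, List.find?, hx]
  | cons y ys ih =>
      by_cases hb : key x < key y
      · have hL : PySem.List.insertBy (fun a b => decide (key a < key b)) x (y :: ys)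
            = x :: y :: ys := by simp [PySem.List.insertBy, hb]
        rw [hL, List.find?_cons_of_neg (by simp [hx])]
      · have hL : PySem.List.insertBy (fun a b => decide (key a < key b)) x (y :: ys)
            = y :: PySem.List.insertBy (fun a b => decide (key a < key b)) x ys := by
          simp [PySem.List.insertBy, hb]
        rw [hL]
        cases hPy : P y with
        | true => rw [List.find?_cons_of_pos hPy, List.find?_cons_of_pos hPy]
        | false =>
            rw [List.find?_cons_of_neg (by simp [hPy]), List.find?_cons_of_neg (by simp [hPy])]
            exact ih

-- min? of a list with one more element at the end
theorem pv_min?_snoc {α : Type} (key : α → Int) (A : List α) (x : α) :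
    PySem.List.min? (A ++ [x]) key =
      (match PySem.List.min? A key with
       | none => some x
       | some m => if key x < key m then some x else some m) := by
  simp only [PySem.List.min?, List.foldl_append, List.foldl]
  rfl

-- KEY LEMMA: the first element of a stable sort satisfying P is the
-- first minimum (by key) of the P-filtered original list.
theorem pv_find?_sorted {α : Type} (key : α → Int) (P : α → Bool) (L : List α) :
    (PySem.List.sorted L key false).find? P = PySem.List.min? (L.filter P) key := by
  induction L using List.reverseRecOn with
  | nil => rfl
  | append_singleton A x ih =>
      rw [pv_sorted_snoc, List.filter_append]
      cases hx : P x with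
      | true =>
          rw [pv_find?_insertBy_pos key P x hx _ (PySem.List.sorted_pairwise A key), ih]
          simp [pv_min?_snoc, hx]
      | false =>
          rw [pv_find?_insertBy_neg key P x hx, ih]
          simp [hx]

-- combinations of a duplicate-free list are pairwise distinct
theorem pv_combinations_nodup {α : Type} [DecidableEq α] :
    ∀ (xs : List α), xs.Nodup → ∀ (r : Nat), (PySem.List.combinations xs r).Nodup := by
  intro xs
  induction xs with
  | nil =>
      intro _ r
      cases r with
      | zero => simp [PySem.List.combinations_zero]
      | succ r => simp [PySem.List.combinations_nil_succ]
  | cons x xs ih =>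
      intro hnd r
      have hx : x ∉ xs := (List.nodup_cons.mp hnd).1
      have hxs : xs.Nodup := (List.nodup_cons.mp hnd).2
      cases r with
      | zero => simp [PySem.List.combinations_zero]
      | succ r =>
          rw [PySem.List.combinations_cons_succ]
          refine List.Nodup.append ?_ (ih hxs (r + 1)) ?_
          · exact (ih hxs r).map (fun a b h => by injection h)
          · intro c hc1 hc2
            rcases List.mem_map.mp hc1 with ⟨c', _, rfl⟩
            have : (x :: c').Sublist xs := PySem.List.sublist_of_mem_combinations hc2
            exact hx (this.subset (by simp))

-- sum over a duplicate-free list splits along a sublist and its complement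
theorem pv_sum_split {α : Type} [DecidableEq α] (f : α → Int) :
    ∀ {c ks : List α}, c.Sublist ks → ks.Nodup →
    (ks.map f).sum = (c.map f).sum + ((ks.filter (fun p => decide (p ∉ c))).map f).sum := by
  intro c ks h
  induction h with
  | slnil => simp
  | @cons c ks x h ih =>
      intro hnd
      have hx : x ∉ ks := (List.nodup_cons.mp hnd).1
      have hxc : x ∉ c := fun hm => hx (h.subset hm)
      simp only [List.map_cons, List.sum_cons, List.filter_cons, hxc,
        not_false_iff, decide_true]
      rw [ih (List.nodup_cons.mp hnd).2]
      simp
      ring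
  | @cons₂ c ks x h ih =>
      intro hnd
      have hx : x ∉ ks := (List.nodup_cons.mp hnd).1
      have hfc : ks.filter (fun p => decide (p ∉ x :: c)) = ks.filter (fun p => decide (p ∉ c)) := by
        apply List.filter_congr
        intro p hp
        have : p ≠ x := fun he => hx (he ▸ hp)
        simp [List.mem_cons, this]
      simp only [List.map_cons, List.sum_cons, List.filter_cons]
      have hxm : (x ∉ x :: c) = False := by simp
      simp only [hxm, decide_false]
      rw [hfc, ih (List.nodup_cons.mp hnd).2]
      simp
      ring

-- getD on a dict built by inserting fresh distinct keys
theorem pv_foldl_insert_getD {κ ν : Type} [BEq κ] [LawfulBEq κ]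
    (l : List κ) (f : κ → ν) (hnd : l.Nodup) (p : κ) (hp : p ∈ l) (d0 : ν) :
    (l.foldl (fun d q => d.insert q (f q)) PySem.Dict.empty).getD p d0 = f p := by
  have hitems :
      (l.foldl (fun d q => d.insert q (f q)) PySem.Dict.empty).items
        = PySem.Dict.empty.items ++ l.map (fun a => (a, f a)) := by
    exact PySem.Dict.items_foldl_insert_fresh l id f PySem.Dict.empty
      (by intro a _; simp) (by simpa using hnd)
  apply PySem.Dict.getD_of_mem_items
  · rw [hitems]
    exact List.mem_append_right _ (List.mem_map.mpr ⟨p, hp, rfl⟩)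
  · show ((_ : PySem.Dict κ ν).items.map Prod.fst).Nodup
    rw [hitems]
    have he : (PySem.Dict.empty : PySem.Dict κ ν).items = [] := rfl
    simpa [he, List.map_map, Function.comp_def] using hnd

-- find? with the always-true predicate is head?
theorem pv_find?_true {α : Type} (l : List α) : l.find? (fun _ => true) = l.head? := by
  cases l <;> simp


-- the matchup list (proof-side helper: what both enumerations denote)
def pvMatchups (players : List (String × List (String × Int))) : List (List String × List String × Int × Int × Int) :=
  let playersD := PySem.Dict.ofList players
  let keys := playersD.keys
  let rate := fun p => (PySem.Dict.ofList (playersD.getD p [])).getD "current_rating" 0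
  let total := (keys.map rate).sum
  (PySem.List.combinations keys (keys.length / 2)).map (fun combo =>
    (combo, keys.filter (fun p => decide (p ∉ combo)), (combo.map rate).sum,
     total - (combo.map rate).sum, |2 * (combo.map rate).sum - total|))

-- port A's matchup loop produces the same list
theorem pv_A_matchups (players : List (String × List (String × Int))) :
    (List.foldl
      (fun acc combo =>
        acc ++
          [(combo, List.filter (fun p => decide (p ∉ combo)) (PySem.Dict.ofList players).keys,
              (List.map
                  (fun p =>
                    (List.foldl
                          (fun d p =>
                            d.insert p
                              ((PySem.Dict.ofList ((PySem.Dict.ofList players).getD p [])).getD "current_rating" 0))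
                          PySem.Dict.empty (PySem.Dict.ofList players).keys).getD
                      p 0)
                  combo).sum,
              (List.map
                  (fun p =>
                    (List.foldl
                          (fun d p =>
                            d.insert p
                              ((PySem.Dict.ofList ((PySem.Dict.ofList players).getD p [])).getD "current_rating" 0))
                          PySem.Dict.empty (PySem.Dict.ofList players).keys).getD
                      p 0)
                  (List.filter (fun p => decide (p ∉ combo)) (PySem.Dict.ofList players).keys)).sum,
              |(List.map
                      (fun p =>
                        (List.foldl
                              (fun d p =>
                                d.insert p
                                  ((PySem.Dict.ofList ((PySem.Dict.ofList players).getD p [])).getD "current_rating" 0))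
                              PySem.Dict.empty (PySem.Dict.ofList players).keys).getD
                          p 0)
                      combo).sum -
                  (List.map
                      (fun p =>
                        (List.foldl
                              (fun d p =>
                                d.insert p
                                  ((PySem.Dict.ofList ((PySem.Dict.ofList players).getD p [])).getD "current_rating"
                                    0))
                              PySem.Dict.empty (PySem.Dict.ofList players).keys).getD
                          p 0)
                      (List.filter (fun p => decide (p ∉ combo)) (PySem.Dict.ofList players).keys)).sum|)])
      [] (PySem.List.combinations (PySem.Dict.ofList players).keys ((PySem.Dict.ofList players).keys.length / 2)))
    = pvMatchups players := by
  rw [PySem.List.foldl_append_singleton_eq_map]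
  simp only [pvMatchups, List.nil_append]
  apply List.map_congr_left
  intro combo hc
  have hknd : (PySem.Dict.ofList players).keys.Nodup := PySem.Dict.nodup_keys_ofList players
  have hsub : combo.Sublist (PySem.Dict.ofList players).keys :=
    PySem.List.sublist_of_mem_combinations hc
  have h1 : List.map
      (fun p =>
        (List.foldl
              (fun d p =>
                d.insert p ((PySem.Dict.ofList ((PySem.Dict.ofList players).getD p [])).getD "current_rating" 0))
              PySem.Dict.empty (PySem.Dict.ofList players).keys).getD
          p 0) combo
      = List.map (fun p => (PySem.Dict.ofList ((PySem.Dict.ofList players).getD p [])).getD "current_rating" 0) combo :=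
    List.map_congr_left (fun p hp =>
      pv_foldl_insert_getD _ _ hknd p (hsub.subset hp) 0)
  have h2 : List.map
      (fun p =>
        (List.foldl
              (fun d p =>
                d.insert p ((PySem.Dict.ofList ((PySem.Dict.ofList players).getD p [])).getD "current_rating" 0))
              PySem.Dict.empty (PySem.Dict.ofList players).keys).getD
          p 0) (List.filter (fun p => decide (p ∉ combo)) (PySem.Dict.ofList players).keys)
      = List.map (fun p => (PySem.Dict.ofList ((PySem.Dict.ofList players).getD p [])).getD "current_rating" 0)
          (List.filter (fun p => decide (p ∉ combo)) (PySem.Dict.ofList players).keys) :=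
    List.map_congr_left (fun p hp =>
      pv_foldl_insert_getD _ _ hknd p (List.mem_of_mem_filter hp) 0)
  rw [h1, h2]
  have hsum := pv_sum_split
    (fun p => (PySem.Dict.ofList ((PySem.Dict.ofList players).getD p [])).getD "current_rating" 0) hsub hknd
  simp only [Prod.mk.injEq, true_and]
  refine ⟨?_, ?_⟩
  · omega
  · rw [show ((List.map (fun p => (PySem.Dict.ofList ((PySem.Dict.ofList players).getD p [])).getD "current_rating" 0) combo).sum -
        (List.map (fun p => (PySem.Dict.ofList ((PySem.Dict.ofList players).getD p [])).getD "current_rating" 0)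
          (List.filter (fun p => decide (p ∉ combo)) (PySem.Dict.ofList players).keys)).sum : Int)
      = 2 * (List.map (fun p => (PySem.Dict.ofList ((PySem.Dict.ofList players).getD p [])).getD "current_rating" 0) combo).sum -
        (List.map (fun p => (PySem.Dict.ofList ((PySem.Dict.ofList players).getD p [])).getD "current_rating" 0)
          (PySem.Dict.ofList players).keys).sum from by omega]

-- the matchup list has no duplicate entries (their team1 components differ)
theorem pv_matchups_nodup (players : List (String × List (String × Int))) :
    (pvMatchups players).Nodup := by
  simp only [pvMatchups]
  apply List.Nodup.map
  · intro a b h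
    exact congrArg Prod.fst h
  · exact pv_combinations_nodup _ (PySem.Dict.nodup_keys_ofList players) _

-- B's recursive generator denotes the combinations enumeration
theorem pv_splits_spec (names : List String) (rate : String → Int) (total : Int) :
    ∀ (k i need : Nat) (t1 t2 : List String) (r1 : Int), names.length - i = k →
    (names.drop i).Nodup →
    pvSplits names rate total i need t1 t2 r1 =
      (PySem.List.combinations (names.drop i) need).map (fun c =>
        (t1 ++ c, t2 ++ (names.drop i).filter (fun p => decide (p ∉ c)),
         r1 + (c.map rate).sum, total - (r1 + (c.map rate).sum),
         |2 * (r1 + (c.map rate).sum) - total|)) := by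
  intro k
  induction k with
  | zero =>
      intro i need t1 t2 r1 hk hnd
      have hi : names.length ≤ i := by omega
      have hd : names.drop i = [] := List.drop_eq_nil_of_le hi
      cases need with
      | zero =>
          rw [pvSplits]
          simp [hd, PySem.List.combinations_zero]
      | succ n =>
          rw [pvSplits]
          simp [hd, PySem.List.combinations_nil_succ, Nat.not_lt.mpr hi]
  | succ k ih =>
      intro i need t1 t2 r1 hk hnd
      have hi : i < names.length := by omega
      have hd : names.drop i = names[i] :: names.drop (i + 1) :=
        List.drop_eq_getElem_cons hi
      have hnd' : (names.drop (i + 1)).Nodup := by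
        rw [hd] at hnd; exact (List.nodup_cons.mp hnd).2
      have hxnot : names[i] ∉ names.drop (i + 1) := by
        rw [hd] at hnd; exact (List.nodup_cons.mp hnd).1
      cases need with
      | zero =>
          rw [pvSplits]
          simp [PySem.List.combinations_zero]
      | succ n =>
          rw [pvSplits]
          simp only [Nat.succ_ne_zero, if_false, dif_pos hi, Nat.add_sub_cancel]
          rw [ih (i + 1) n (t1 ++ [names[i]]) t2 (r1 + rate names[i]) (by omega) hnd',
              ih (i + 1) (n + 1) t1 (t2 ++ [names[i]]) r1 (by omega) hnd',
              hd, PySem.List.combinations_cons_succ, List.map_append, List.map_map]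
          congr 1
          · apply List.map_congr_left
            intro c hc
            have hcsub : c.Sublist (names.drop (i + 1)) :=
              PySem.List.sublist_of_mem_combinations hc
            have hxc : names[i] ∉ c := fun hm => hxnot (hcsub.subset hm)
            have hfc : (names.drop (i + 1)).filter (fun p => decide (p ∉ names[i] :: c))
                = (names.drop (i + 1)).filter (fun p => decide (p ∉ c)) := by
              apply List.filter_congr
              intro p hp
              have hpx : p ≠ names[i] := fun he => hxnot (he ▸ hp)
              simp [List.mem_cons, hpx]
            simp only [Function.comp_apply, List.filter_cons]
            have hxm : (names[i] ∉ names[i] :: c) = False := by simp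
            simp only [hxm, decide_false]
            rw [hfc]
            simp only [Prod.mk.injEq]
            refine ⟨by simp, rfl, by simp [add_assoc], by simp [add_assoc], by simp [add_assoc]⟩
          · apply List.map_congr_left
            intro c hc
            have hcsub : c.Sublist (names.drop (i + 1)) :=
              PySem.List.sublist_of_mem_combinations hc
            have hxc : names[i] ∉ c := fun hm => hxnot (hcsub.subset hm)
            simp only [List.filter_cons, hxc, not_false_iff, decide_true]
            simp

-- B's splits from the top call denote exactly the matchup list
theorem pv_B_splits (players : List (String × List (String × Int))) :
    pvSplits (PySem.Dict.ofList players).keys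
      (fun p => (PySem.Dict.ofList ((PySem.Dict.ofList players).getD p [])).getD "current_rating" 0)
      ((PySem.Dict.ofList players).keys.map
        (fun p => (PySem.Dict.ofList ((PySem.Dict.ofList players).getD p [])).getD "current_rating" 0)).sum
      0 ((PySem.Dict.ofList players).keys.length / 2) [] [] 0
    = pvMatchups players := by
  rw [pv_splits_spec _ _ _ ((PySem.Dict.ofList players).keys.length) 0 _ [] [] 0 (by omega)
      (by simp [PySem.Dict.nodup_keys_ofList players])]
  simp [pvMatchups]

-- a paired fold with componentwise steps is the pair of the folds
theorem pv_foldl_pair {α β γ : Type} (g1 : β → α → β) (g2 : γ → α → γ) :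
    ∀ (L : List α) (a : β) (b : γ),
    L.foldl (fun st m => (g1 st.1 m, g2 st.2 m)) (a, b) = (L.foldl g1 a, L.foldl g2 b) := by
  intro L
  induction L with
  | nil => intro a b; rfl
  | cons x t ih => intro a b; simp [List.foldl, ih]

-- a guarded min-update fold is the min-update fold of the filtered list
theorem pv_foldl_guard {α β : Type} (P : α → Bool) (upd : β → α → β) :
    ∀ (L : List α) (s : β),
    L.foldl (fun s m => if P m then upd s m else s) s = (L.filter P).foldl upd s := by
  intro L
  induction L with
  | nil => intro s; rfl
  | cons x t ih =>
      intro s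
      cases hx : P x <;> simp [List.foldl, hx, ih]

-- the running-first-minimum fold is PySem.List.min? (monomorphic, for rw)
theorem pv_foldl_min5 (L : List (List String × List String × Int × Int × Int)) :
    L.foldl (fun cur m => match cur with
      | none => some m
      | some b => if m.2.2.2.2 < b.2.2.2.2 then some m else some b) none
    = PySem.List.min? L (fun m => m.2.2.2.2) := by
  unfold PySem.List.min?
  congr 1
  funext acc x
  cases acc <;> rfl

-- sort + linear scan (port A's tail) equals the min?-based selection on any
-- duplicate-free matchup list
theorem pv_select (L : List (List String × List String × Int × Int × Int)) (hnd : L.Nodup) :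
    (match PySem.List.sorted L (fun m => m.2.2.2.2) false with
     | [] => []
     | best :: tail =>
       match tail.find? (fun m =>
           decide (¬ PySem.Set.equal (PySem.Set.ofList m.1) (PySem.Set.ofList best.2.1))) with
       | some second => [best, second]
       | none => [best, if tail.length + 1 > 1 then tail.headD best else best])
    =
    (match PySem.List.min? L (fun m => m.2.2.2.2) with
     | none => []
     | some best =>
       match PySem.List.min? (L.filter (fun m =>
           decide (m ≠ best) && decide (¬ PySem.Set.equal (PySem.Set.ofList m.1) (PySem.Set.ofList best.2.1))))
           (fun m => m.2.2.2.2) with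
       | some second => [best, second]
       | none =>
         match PySem.List.min? (L.filter (fun m => decide (m ≠ best))) (fun m => m.2.2.2.2) with
         | some second => [best, second]
         | none => [best, best]) := by
  cases hS : PySem.List.sorted L (fun m => m.2.2.2.2) false with
  | nil =>
      have hL : L = [] := (PySem.List.sorted_eq_nil_iff L _ false).mp hS
      subst hL
      rfl
  | cons best tail =>
      have hmin : PySem.List.min? L (fun m => m.2.2.2.2) = some best := by
        have h := pv_find?_sorted (fun m => m.2.2.2.2) (fun _ => true) L
        rw [hS] at h
        simpa [List.find?] using h.symm
      rw [hmin]
      dsimp only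
      have hSnd : (best :: tail).Nodup := by
        have hp := PySem.List.sorted_perm L (fun m => m.2.2.2.2) false
        rw [hS] at hp
        exact hp.nodup_iff.mpr hnd
      have hbt : best ∉ tail := (List.nodup_cons.mp hSnd).1
      have hcand : PySem.List.min? (L.filter (fun m =>
          decide (m ≠ best) && decide (¬ PySem.Set.equal (PySem.Set.ofList m.1) (PySem.Set.ofList best.2.1))))
          (fun m => m.2.2.2.2)
          = tail.find? (fun m =>
              decide (¬ PySem.Set.equal (PySem.Set.ofList m.1) (PySem.Set.ofList best.2.1))) := by
        rw [← pv_find?_sorted, hS, List.find?_cons_of_neg (by simp)]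
        exact pv_find?_congr tail (fun a ha => by
          simp [ne_of_mem_of_not_mem ha hbt])
      rw [hcand]
      cases hf : tail.find? (fun m =>
          decide (¬ PySem.Set.equal (PySem.Set.ofList m.1) (PySem.Set.ofList best.2.1))) with
      | some second => rfl
      | none =>
          have hrest : PySem.List.min? (L.filter (fun m => decide (m ≠ best))) (fun m => m.2.2.2.2)
              = tail.head? := by
            rw [← pv_find?_sorted, hS, List.find?_cons_of_neg (by simp)]
            rw [pv_find?_congr (p := fun m => decide (m ≠ best)) (q := fun _ => true) tail
              (fun a ha => by simp [ne_of_mem_of_not_mem ha hbt]), pv_find?_true]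
          rw [hrest]
          cases tail with
          | nil => rfl
          | cons t ts => rfl

-- B's pass-2 fold computes the two filtered first-minima
theorem pv_pass2 (L : List (List String × List String × Int × Int × Int))
    (best : List String × List String × Int × Int × Int) :
    L.foldl
      (fun (st : Option (List String × List String × Int × Int × Int) ×
                 Option (List String × List String × Int × Int × Int)) m =>
        if m = best then st
        else
          ((if decide (¬ PySem.Set.equal (PySem.Set.ofList m.1) (PySem.Set.ofList best.2.1)) then
              match st.1 with
              | none => some m
              | some s => if m.2.2.2.2 < s.2.2.2.2 then some m else some s
            else st.1),
           (match st.2 with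
            | none => some m
            | some f => if m.2.2.2.2 < f.2.2.2.2 then some m else some f)))
      (none, none)
    = (PySem.List.min? (L.filter (fun m =>
          decide (m ≠ best) && decide (¬ PySem.Set.equal (PySem.Set.ofList m.1) (PySem.Set.ofList best.2.1))))
          (fun m => m.2.2.2.2),
       PySem.List.min? (L.filter (fun m => decide (m ≠ best))) (fun m => m.2.2.2.2)) := by
  have hstep : (fun (st : Option (List String × List String × Int × Int × Int) ×
                 Option (List String × List String × Int × Int × Int)) m =>
        if m = best then st
        else
          ((if decide (¬ PySem.Set.equal (PySem.Set.ofList m.1) (PySem.Set.ofList best.2.1)) then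
              match st.1 with
              | none => some m
              | some s => if m.2.2.2.2 < s.2.2.2.2 then some m else some s
            else st.1),
           (match st.2 with
            | none => some m
            | some f => if m.2.2.2.2 < f.2.2.2.2 then some m else some f)))
      = (fun st m =>
          ((fun s m => if (decide (m ≠ best) && decide (¬ PySem.Set.equal (PySem.Set.ofList m.1) (PySem.Set.ofList best.2.1)) : Bool) then
              (match s with
               | none => some m
               | some s => if m.2.2.2.2 < s.2.2.2.2 then some m else some s) else s) st.1 m,
           (fun s m => if (decide (m ≠ best) : Bool) then
              (match s with
               | none => some m
               | some f => if m.2.2.2.2 < f.2.2.2.2 then some m else some f) else s) st.2 m)) := by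
    funext st m
    by_cases hb : m = best
    · simp [hb]
    · by_cases he : PySem.Set.equal (PySem.Set.ofList m.1) (PySem.Set.ofList best.2.1) <;>
        simp [hb, he]
  rw [hstep]
  rw [pv_foldl_pair
    (fun s m => if (decide (m ≠ best) && decide (¬ PySem.Set.equal (PySem.Set.ofList m.1) (PySem.Set.ofList best.2.1)) : Bool) then
        (match s with
         | none => some m
         | some s => if m.2.2.2.2 < s.2.2.2.2 then some m else some s) else s)
    (fun s m => if (decide (m ≠ best) : Bool) then
        (match s with
         | none => some m
         | some f => if m.2.2.2.2 < f.2.2.2.2 then some m else some f) else s)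
    L none none]
  rw [pv_foldl_guard (fun m => (decide (m ≠ best) && decide (¬ PySem.Set.equal (PySem.Set.ofList m.1) (PySem.Set.ofList best.2.1)) : Bool)) _ L none]
  rw [pv_foldl_guard (fun m => (decide (m ≠ best) : Bool)) _ L none]
  rw [pv_foldl_min5, pv_foldl_min5]

-- the two ports agree on every input
theorem pv_main (players : List (String × List (String × Int))) :
    create_balanced_teams players = create_balanced_teams_alt players := by
  simp only [create_balanced_teams, create_balanced_teams_alt]
  rw [pv_A_matchups players, pv_B_splits players, pv_foldl_min5 (pvMatchups players)]
  rw [pv_select (pvMatchups players) (pv_matchups_nodup players)]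
  cases PySem.List.min? (pvMatchups players) (fun m => m.2.2.2.2) with
  | none => rfl
  | some best =>
      dsimp only
      rw [pv_pass2]

-- ===== VERDICT (by name: the statement is the Claim_ definition above) =====
theorem create_balanced_teams_spec : Claim_equal_create_balanced_teams := by
  intro players _ _
  exact pv_main players
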